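-- pv_equiv track=rewrite | github.com/webbOF/smile_adventure | backend/app/users/schemas.py | validate_age_appropriate_content
-- ===== SOURCE A (Python) =====
-- def validate_age_appropriate_content(age: int, content_category: str) -> bool:
--     """Validate content is age-appropriate"""
--     age_ranges = {
--         'toddler': (0, 3),
--         'preschool': (3, 6),
--         'elementary': (6, 12),
--         'teen': (12, 18),
--         'young_adult': (18, 25)
--     }
--
--     for category, (min_age, max_age) in age_ranges.items():
--         if min_age <= age < max_age:
--             return content_category in ['universal', category]
--
--     return content_category == 'universal'
-- ===== SOURCE B (Python) =====
-- import bisect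
--
-- _BOUNDARIES = [0, 3, 6, 12, 18, 25]
-- _CATEGORIES = ['toddler', 'preschool', 'elementary', 'teen', 'young_adult']
--
-- def validate_age_appropriate_content(age: int, content_category: str) -> bool:
--     if 0 <= age < 25:
--         category = _CATEGORIES[bisect.bisect_right(_BOUNDARIES, age) - 1]
--         return content_category == 'universal' or content_category == category
--     return content_category == 'universal'
-- ===== Notes on version B (the rewrite author's own statement) =====
-- stated objective: idiomatic
-- what changed: Replaces the linear scan over a dict of (min,max) ranges with a sorted boundary list indexed by bisect_right under a single 0 <= age < 25 guard.
import Mathlib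
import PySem

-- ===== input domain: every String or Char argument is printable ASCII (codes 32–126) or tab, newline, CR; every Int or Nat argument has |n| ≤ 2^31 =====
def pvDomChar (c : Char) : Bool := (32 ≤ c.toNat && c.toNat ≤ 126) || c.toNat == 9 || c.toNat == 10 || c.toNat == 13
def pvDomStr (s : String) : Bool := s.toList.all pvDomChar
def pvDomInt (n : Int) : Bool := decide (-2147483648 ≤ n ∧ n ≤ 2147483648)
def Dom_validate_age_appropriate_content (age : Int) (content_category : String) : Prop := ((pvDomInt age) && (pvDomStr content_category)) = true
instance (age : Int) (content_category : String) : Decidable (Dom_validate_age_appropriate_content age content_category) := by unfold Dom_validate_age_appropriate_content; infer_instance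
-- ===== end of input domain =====

-- B replaces A's linear dict scan with a bisect_right index into a sorted boundary list (idiomatic; return value only).


-- ===== PORT A =====
-- the for-loop over age_ranges.items(): first matching range returns, else fall through
def pvLoopA (age : Int) (content_category : String) : List (String × Int × Int) → Bool
  | [] => content_category == "universal"
  | (category, min_age, max_age) :: rest =>
      if min_age ≤ age ∧ age < max_age then
        content_category == "universal" || content_category == category
      else
        pvLoopA age content_category rest

def validate_age_appropriate_content (age : Int) (content_category : String) : Bool :=
  pvLoopA age content_category
    [("toddler", 0, 3), ("preschool", 3, 6), ("elementary", 6, 12),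
     ("teen", 12, 18), ("young_adult", 18, 25)]

-- ===== PORT B =====
def pvBoundaries : List Int := [0, 3, 6, 12, 18, 25]
def pvCategories : List String := ["toddler", "preschool", "elementary", "teen", "young_adult"]

-- bisect.bisect_right on a sorted list = number of elements ≤ age
def pvBisectRight (xs : List Int) (x : Int) : Nat :=
  xs.countP (fun b => decide (b ≤ x))

def validate_age_appropriate_content_alt (age : Int) (content_category : String) : Bool :=
  if 0 ≤ age ∧ age < 25 then
    let category := pvCategories.getD (pvBisectRight pvBoundaries age - 1) ""
    content_category == "universal" || content_category == category
  else
    content_category == "universal"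

-- ===== PRECONDITION & SPEC =====
def Spec_validate_age_appropriate_content (age : Int) (content_category : String) (out : Bool) : Prop := out = validate_age_appropriate_content_alt age content_category
instance (age : Int) (content_category : String) (out : Bool) : Decidable (Spec_validate_age_appropriate_content age content_category out) := by unfold Spec_validate_age_appropriate_content; infer_instance

-- ===== CLAIM (what is proved, stated in full; the proofs are below) =====
def Claim_equal_validate_age_appropriate_content : Prop := ∀ (age : Int) (content_category : String), Dom_validate_age_appropriate_content age content_category → Spec_validate_age_appropriate_content age content_category (validate_age_appropriate_content age content_category)

-- ===== LEMMAS AND PROOFS =====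

-- ===== VERDICT (by name: the statement is the Claim_ definition above) =====
theorem validate_age_appropriate_content_spec : Claim_equal_validate_age_appropriate_content := by
  intro age cc _
  unfold Spec_validate_age_appropriate_content validate_age_appropriate_content
    validate_age_appropriate_content_alt pvLoopA pvBisectRight pvBoundaries pvCategories
  rcases Int.lt_or_le age 0 with h0 | h0
  · simp [show ¬ ((0:Int) ≤ age ∧ age < 3) by omega, show ¬ ((3:Int) ≤ age ∧ age < 6) by omega,
      show ¬ ((6:Int) ≤ age ∧ age < 12) by omega, show ¬ ((12:Int) ≤ age ∧ age < 18) by omega,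
      show ¬ ((18:Int) ≤ age ∧ age < 25) by omega, show ¬ ((0:Int) ≤ age ∧ age < 25) by omega,
      pvLoopA]
  rcases Int.lt_or_le age 3 with h1 | h1
  · simp [show ((0:Int) ≤ age ∧ age < 3) by omega, show ((0:Int) ≤ age ∧ age < 25) by omega,
      List.countP, List.countP.go, show (0:Int) ≤ age by omega,
      show ¬ ((3:Int) ≤ age) by omega, show ¬ ((6:Int) ≤ age) by omega,
      show ¬ ((12:Int) ≤ age) by omega, show ¬ ((18:Int) ≤ age) by omega,
      show ¬ ((25:Int) ≤ age) by omega]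
  rcases Int.lt_or_le age 6 with h2 | h2
  · simp [show ¬ ((0:Int) ≤ age ∧ age < 3) by omega, show ((3:Int) ≤ age ∧ age < 6) by omega,
      show ((0:Int) ≤ age ∧ age < 25) by omega, pvLoopA,
      List.countP, List.countP.go, show (0:Int) ≤ age by omega, show (3:Int) ≤ age by omega,
      show ¬ ((6:Int) ≤ age) by omega, show ¬ ((12:Int) ≤ age) by omega,
      show ¬ ((18:Int) ≤ age) by omega, show ¬ ((25:Int) ≤ age) by omega]
  rcases Int.lt_or_le age 12 with h3 | h3
  · simp [show ¬ ((0:Int) ≤ age ∧ age < 3) by omega, show ¬ ((3:Int) ≤ age ∧ age < 6) by omega,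
      show ((6:Int) ≤ age ∧ age < 12) by omega, show ((0:Int) ≤ age ∧ age < 25) by omega, pvLoopA,
      show ¬ (age < 3) by omega, show ¬ (age < 6) by omega,
      List.countP, List.countP.go, show (0:Int) ≤ age by omega, show (3:Int) ≤ age by omega,
      show (6:Int) ≤ age by omega, show ¬ ((12:Int) ≤ age) by omega,
      show ¬ ((18:Int) ≤ age) by omega, show ¬ ((25:Int) ≤ age) by omega]
  rcases Int.lt_or_le age 18 with h4 | h4
  · simp [show ¬ ((0:Int) ≤ age ∧ age < 3) by omega, show ¬ ((3:Int) ≤ age ∧ age < 6) by omega,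
      show ¬ ((6:Int) ≤ age ∧ age < 12) by omega, show ((12:Int) ≤ age ∧ age < 18) by omega,
      show ((0:Int) ≤ age ∧ age < 25) by omega, pvLoopA,
      show ¬ (age < 3) by omega, show ¬ (age < 6) by omega, show ¬ (age < 12) by omega,
      List.countP, List.countP.go, show (0:Int) ≤ age by omega, show (3:Int) ≤ age by omega,
      show (6:Int) ≤ age by omega, show (12:Int) ≤ age by omega,
      show ¬ ((18:Int) ≤ age) by omega, show ¬ ((25:Int) ≤ age) by omega]
  rcases Int.lt_or_le age 25 with h5 | h5
  · simp [show ¬ ((0:Int) ≤ age ∧ age < 3) by omega, show ¬ ((3:Int) ≤ age ∧ age < 6) by omega,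
      show ¬ ((6:Int) ≤ age ∧ age < 12) by omega, show ¬ ((12:Int) ≤ age ∧ age < 18) by omega,
      show ((18:Int) ≤ age ∧ age < 25) by omega, show ((0:Int) ≤ age ∧ age < 25) by omega, pvLoopA,
      show ¬ (age < 3) by omega, show ¬ (age < 6) by omega, show ¬ (age < 12) by omega,
      show ¬ (age < 18) by omega,
      List.countP, List.countP.go, show (0:Int) ≤ age by omega, show (3:Int) ≤ age by omega,
      show (6:Int) ≤ age by omega, show (12:Int) ≤ age by omega, show (18:Int) ≤ age by omega,
      show ¬ ((25:Int) ≤ age) by omega]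
  · simp [show ¬ ((0:Int) ≤ age ∧ age < 3) by omega, show ¬ ((3:Int) ≤ age ∧ age < 6) by omega,
      show ¬ ((6:Int) ≤ age ∧ age < 12) by omega, show ¬ ((12:Int) ≤ age ∧ age < 18) by omega,
      show ¬ ((18:Int) ≤ age ∧ age < 25) by omega, show ¬ ((0:Int) ≤ age ∧ age < 25) by omega,
      pvLoopA]
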